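-- pv_equiv track=rewrite | github.com/wannavi/ps | programmers/체육복.py | solution
-- ===== SOURCE A (Python) =====
-- from typing import List
--
-- def solution(n: int, lost: List[int], reserve: List[int]) -> int:
--     lost_map = {n: 1 for n in sorted(lost)}
--     reserve_map = {n: 1 for n in sorted(reserve)}
--
--     # me first
--     for key, is_valid in lost_map.items():
--         if not is_valid:
--             continue
--
--         if key in reserve_map and reserve_map[key]:
--             lost_map[key] = 0
--             reserve_map[key] = 0
--
--     # others next
--     for key, is_valid in lost_map.items():
--         if not is_valid:
--             continue
--
--         if key - 1 in reserve_map and reserve_map[key - 1]: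
--             lost_map[key] = 0
--             reserve_map[key - 1] = 0
--         elif key + 1 in reserve_map and reserve_map[key + 1]:
--             lost_map[key] = 0
--             reserve_map[key + 1] = 0
--
--     lost_count = 0
--     for v in lost_map.values():
--         if v == 1:
--             lost_count += 1
--
--     return n - lost_count
-- ===== SOURCE B (Python) =====
-- def solution(n, lost, reserve):
--     L = sorted(set(lost) - set(reserve))
--     R = sorted(set(reserve) - set(lost))
--     i = j = matched = 0
--     while i < len(L) and j < len(R):
--         if L[i] - R[j] == 1 or R[j] - L[i] == 1:
--             matched += 1
--             i += 1
--             j += 1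
--         elif L[i] < R[j]:
--             i += 1
--         else:
--             j += 1
--     return n - (len(L) - matched)
-- ===== Notes on version B (the rewrite author's own statement) =====
-- stated objective: simpler
-- what changed: Replaces A's two flag-nulling dict passes (self-match pass, then neighbour pass re-scanning dict values) with set differences and a single two-pointer merge of the two sorted distinct lists that counts adjacent pairs directly.
import Mathlib
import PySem

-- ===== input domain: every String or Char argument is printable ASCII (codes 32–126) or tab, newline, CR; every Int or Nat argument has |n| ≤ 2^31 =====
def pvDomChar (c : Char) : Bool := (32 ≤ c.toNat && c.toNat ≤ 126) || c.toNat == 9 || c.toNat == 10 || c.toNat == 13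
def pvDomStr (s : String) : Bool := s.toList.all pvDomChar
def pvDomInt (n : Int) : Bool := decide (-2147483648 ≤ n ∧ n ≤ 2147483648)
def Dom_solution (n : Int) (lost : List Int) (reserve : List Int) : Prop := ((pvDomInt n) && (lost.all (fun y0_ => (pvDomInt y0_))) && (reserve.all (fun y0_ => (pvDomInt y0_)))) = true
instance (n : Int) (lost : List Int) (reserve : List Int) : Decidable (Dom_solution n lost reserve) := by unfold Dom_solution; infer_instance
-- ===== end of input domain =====

-- B replaces A's two flag-nulling dict passes by set differences plus one two-pointer
-- merge of the two sorted distinct lists (objective: simpler; return value only, no mutation).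

-- ===== PORT A =====
-- Python iterates over lost_map.items() while setting values; only the CURRENT key's value
-- is ever overwritten, so reading is_valid from the evolving dict is exact.
def solution (n : Int) (lost : List Int) (reserve : List Int) : Int :=
  let lost_map : PySem.Dict Int Int :=
    (PySem.List.sorted lost (fun x => x) false).foldl (fun d k => d.insert k 1) PySem.Dict.empty
  let reserve_map : PySem.Dict Int Int :=
    (PySem.List.sorted reserve (fun x => x) false).foldl (fun d k => d.insert k 1) PySem.Dict.empty
  -- me first
  let st1 :=
    lost_map.keys.foldl
      (fun (st : PySem.Dict Int Int × PySem.Dict Int Int) key =>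
        let is_valid := st.1.getD key 0
        if is_valid == 0 then st
        else if st.2.contains key && !(st.2.getD key 0 == 0) then
          (st.1.insert key 0, st.2.insert key 0)
        else st)
      (lost_map, reserve_map)
  -- others next
  let st2 :=
    st1.1.keys.foldl
      (fun (st : PySem.Dict Int Int × PySem.Dict Int Int) key =>
        let is_valid := st.1.getD key 0
        if is_valid == 0 then st
        else if st.2.contains (key - 1) && !(st.2.getD (key - 1) 0 == 0) then
          (st.1.insert key 0, st.2.insert (key - 1) 0)
        else if st.2.contains (key + 1) && !(st.2.getD (key + 1) 0 == 0) then
          (st.1.insert key 0, st.2.insert (key + 1) 0)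
        else st)
      st1
  let lost_count : Int := st2.1.values.foldl (fun acc v => if v == 1 then acc + 1 else acc) 0
  n - lost_count

-- ===== PORT B =====
-- the while loop over indices i, j as the standard structural recursion on the two lists
def pvMatchLoop : List Int → List Int → Int
  | [], _ => 0
  | _ :: _, [] => 0
  | l :: L, r :: R =>
    if l - r == 1 || r - l == 1 then pvMatchLoop L R + 1
    else if l < r then pvMatchLoop L (r :: R)
    else pvMatchLoop (l :: L) R
  termination_by L R => L.length + R.length
  decreasing_by all_goals simp_wf <;> omega

def solution_alt (n : Int) (lost : List Int) (reserve : List Int) : Int :=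
  let L := PySem.List.sorted (PySem.Set.diff (PySem.Set.ofList lost) (PySem.Set.ofList reserve)) (fun x => x) false
  let R := PySem.List.sorted (PySem.Set.diff (PySem.Set.ofList reserve) (PySem.Set.ofList lost)) (fun x => x) false
  n - ((L.length : Int) - pvMatchLoop L R)

-- ===== PRECONDITION & SPEC =====
def Spec_solution (n : Int) (lost : List Int) (reserve : List Int) (out : Int) : Prop := out = solution_alt n lost reserve
instance (n : Int) (lost : List Int) (reserve : List Int) (out : Int) : Decidable (Spec_solution n lost reserve out) := by unfold Spec_solution; infer_instance

-- ===== CLAIM (what is proved, stated in full; the proofs are below) =====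
def Claim_equal_solution : Prop := ∀ (n : Int) (lost : List Int) (reserve : List Int), Dom_solution n lost reserve → Spec_solution n lost reserve (solution n lost reserve)


-- ===== LEMMAS AND PROOFS =====

-- generic shape of both of A's passes: try the candidate reserves of each key in order
def pvCands1 (k : Int) : List Int := [k]
def pvCands2 (k : Int) : List Int := [k - 1, k + 1]

def pvStep (cands : Int → List Int) (st : PySem.Dict Int Int × PySem.Dict Int Int)
    (key : Int) : PySem.Dict Int Int × PySem.Dict Int Int :=
  if st.1.getD key 0 == 0 then st
  else
    match (cands key).find? (fun c => !(st.2.getD c 0 == 0)) with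
    | some c => (st.1.insert key 0, st.2.insert c 0)
    | none => st

-- abstract greedy: matched keys and residual availability list
def pvGMatch (cands : Int → List Int) : List Int → List Int → List Int × List Int
  | [], S => ([], S)
  | k :: K, S =>
    match (cands k).find? (fun c => decide (c ∈ S)) with
    | some c => ((k :: (pvGMatch cands K (S.erase c)).1), (pvGMatch cands K (S.erase c)).2)
    | none => pvGMatch cands K S

lemma pvStep1_eq :
    (fun (st : PySem.Dict Int Int × PySem.Dict Int Int) key =>
        let is_valid := st.1.getD key 0
        if is_valid == 0 then st
        else if st.2.contains key && !(st.2.getD key 0 == 0) then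
          (st.1.insert key 0, st.2.insert key 0)
        else st) = pvStep pvCands1 := by
  funext st key
  have hc : ∀ c, (st.2.contains c && !(st.2.getD c 0 == 0)) = !(st.2.getD c 0 == 0) := by
    intro c; cases h : st.2.contains c
    · rw [PySem.Dict.getD_of_not_contains (h := h)]; simp
    · simp
  simp only [pvStep, pvCands1, List.find?_cons, List.find?_nil, hc]
  cases h1 : (st.1.getD key 0 == 0) <;> cases h2 : (st.2.getD key 0 == 0) <;> simp [h1, h2]

lemma pvStep2_eq :
    (fun (st : PySem.Dict Int Int × PySem.Dict Int Int) key =>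
        let is_valid := st.1.getD key 0
        if is_valid == 0 then st
        else if st.2.contains (key - 1) && !(st.2.getD (key - 1) 0 == 0) then
          (st.1.insert key 0, st.2.insert (key - 1) 0)
        else if st.2.contains (key + 1) && !(st.2.getD (key + 1) 0 == 0) then
          (st.1.insert key 0, st.2.insert (key + 1) 0)
        else st) = pvStep pvCands2 := by
  funext st key
  have hc : ∀ c, (st.2.contains c && !(st.2.getD c 0 == 0)) = !(st.2.getD c 0 == 0) := by
    intro c; cases h : st.2.contains c
    · rw [PySem.Dict.getD_of_not_contains (h := h)]; simp
    · simp
  simp only [pvStep, pvCands2, List.find?_cons, List.find?_nil, hc]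
  cases h1 : (st.1.getD key 0 == 0) <;> cases h2 : (st.2.getD (key - 1) 0 == 0) <;>
    cases h3 : (st.2.getD (key + 1) 0 == 0) <;> simp [h1, h2, h3]

lemma pvPass_shape (cands : Int → List Int) :
    ∀ (ks : List Int) (lm rm : PySem.Dict Int Int) (S : List Int),
      ks.Nodup → (∀ k ∈ ks, lm.contains k = true) → S.Nodup →
      (∀ x, (¬ rm.getD x 0 = 0) ↔ x ∈ S) →
      ((ks.foldl (pvStep cands) (lm, rm)).1.keys = lm.keys ∧
       (∀ x, (ks.foldl (pvStep cands) (lm, rm)).1.getD x 0 =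
          if x ∈ (pvGMatch cands (ks.filter (fun k => !(lm.getD k 0 == 0))) S).1 then 0
          else lm.getD x 0) ∧
       (∀ x, (¬ (ks.foldl (pvStep cands) (lm, rm)).2.getD x 0 = 0) ↔
          x ∈ (pvGMatch cands (ks.filter (fun k => !(lm.getD k 0 == 0))) S).2)) := by
  intro ks
  induction ks with
  | nil =>
    intro lm rm S _ _ _ hrm
    refine ⟨rfl, ?_, ?_⟩
    · intro x; simp [pvGMatch]
    · intro x; simpa [pvGMatch] using hrm x
  | cons k ks ih =>
    intro lm rm S hnd hkeys hS hrm
    have hkks : k ∉ ks := (List.nodup_cons.mp hnd).1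
    have hnd' : ks.Nodup := (List.nodup_cons.mp hnd).2
    have hkc : lm.contains k = true := hkeys k List.mem_cons_self
    have hpred : ∀ c, (!(rm.getD c 0 == 0)) = decide (c ∈ S) := by
      intro c
      have := hrm c
      by_cases h : rm.getD c 0 = 0
      · have hns : c ∉ S := fun hm => (this.mpr hm) h
        simp [h, hns]
      · simp [h, this.mp h]
    have hfind : (cands k).find? (fun c => !(rm.getD c 0 == 0)) =
        (cands k).find? (fun c => decide (c ∈ S)) := by
      have : (fun c => !(rm.getD c 0 == 0)) = (fun c => decide (c ∈ S)) := funext hpred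
      rw [this]
    simp only [List.foldl_cons]
    by_cases h0 : lm.getD k 0 = 0
    · -- skipped key
      have hstep : pvStep cands (lm, rm) k = (lm, rm) := by
        simp [pvStep, h0]
      have hfil : (k :: ks).filter (fun k' => !(lm.getD k' 0 == 0)) =
          ks.filter (fun k' => !(lm.getD k' 0 == 0)) := by
        simp [List.filter_cons, h0]
      rw [hstep, hfil]
      exact ih lm rm S hnd' (fun k' hm => hkeys k' (List.mem_cons_of_mem _ hm)) hS hrm
    · have hfil : (k :: ks).filter (fun k' => !(lm.getD k' 0 == 0)) =
          k :: ks.filter (fun k' => !(lm.getD k' 0 == 0)) := by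
        simp [List.filter_cons, h0]
      rw [hfil]
      cases hf : (cands k).find? (fun c => decide (c ∈ S)) with
      | some c =>
        have hcS : c ∈ S := by
          have := List.find?_some hf
          simpa using this
        have hstep : pvStep cands (lm, rm) k = (lm.insert k 0, rm.insert c 0) := by
          simp only [pvStep]
          rw [if_neg (by simpa using h0), hfind, hf]
        rw [hstep]
        have hkeys' : ∀ k' ∈ ks, (lm.insert k 0).contains k' = true := by
          intro k' hm
          rw [PySem.Dict.contains_insert]
          simp [hkeys k' (List.mem_cons_of_mem _ hm)]
        have hrm' : ∀ x, (¬ (rm.insert c 0).getD x 0 = 0) ↔ x ∈ S.erase c := by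
          intro x
          rw [PySem.Dict.getD_insert]
          by_cases hxc : x = c
          · subst hxc
            simp [List.Nodup.not_mem_erase hS]
          · simp only [if_neg hxc]
            rw [hrm x, List.mem_erase_of_ne hxc]
        obtain ⟨ihk, ihl, ihr⟩ := ih (lm.insert k 0) (rm.insert c 0) (S.erase c)
          hnd' hkeys' (hS.erase c) hrm'
        have hfil2 : ks.filter (fun k' => !((lm.insert k 0).getD k' 0 == 0)) =
            ks.filter (fun k' => !(lm.getD k' 0 == 0)) := by
          apply List.filter_congr
          intro x hx
          have hne : x ≠ k := fun he => hkks (he ▸ hx)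
          rw [PySem.Dict.getD_insert, if_neg hne]
        rw [hfil2] at ihl ihr
        have hgm : pvGMatch cands (k :: ks.filter (fun k' => !(lm.getD k' 0 == 0))) S =
            ((k :: (pvGMatch cands (ks.filter (fun k' => !(lm.getD k' 0 == 0))) (S.erase c)).1),
             (pvGMatch cands (ks.filter (fun k' => !(lm.getD k' 0 == 0))) (S.erase c)).2) := by
          simp only [pvGMatch, hf]
        refine ⟨?_, ?_, ?_⟩
        · rw [ihk]
          exact PySem.Dict.keys_insert_of_contains lm 0 hkc
        · intro x
          rw [ihl x, hgm]
          by_cases hx1 : x ∈ (pvGMatch cands (ks.filter (fun k' => !(lm.getD k' 0 == 0))) (S.erase c)).1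
          · simp [hx1, List.mem_cons]
          · by_cases hxk : x = k
            · subst hxk
              simp [hx1, PySem.Dict.getD_insert]
            · simp only [if_neg hx1]
              rw [PySem.Dict.getD_insert, if_neg hxk]
              have : x ∉ k :: (pvGMatch cands (ks.filter (fun k' => !(lm.getD k' 0 == 0))) (S.erase c)).1 := by
                simp [List.mem_cons, hxk, hx1]
              simp [this]
        · intro x
          rw [ihr x, hgm]
      | none =>
        have hstep : pvStep cands (lm, rm) k = (lm, rm) := by
          simp only [pvStep]
          rw [if_neg (by simpa using h0), hfind, hf]
        rw [hstep]
        have hgm : pvGMatch cands (k :: ks.filter (fun k' => !(lm.getD k' 0 == 0))) S =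
            pvGMatch cands (ks.filter (fun k' => !(lm.getD k' 0 == 0))) S := by
          simp only [pvGMatch, hf]
        rw [hgm]
        exact ih lm rm S hnd' (fun k' hm => hkeys k' (List.mem_cons_of_mem _ hm)) hS hrm

lemma pvGMatch_matched_sublist (cands : Int → List Int) :
    ∀ (K S : List Int), ((pvGMatch cands K S).1).Sublist K := by
  intro K
  induction K with
  | nil => intro S; simp [pvGMatch]
  | cons k K ih =>
    intro S
    simp only [pvGMatch]
    cases hf : (cands k).find? (fun c => decide (c ∈ S)) with
    | some c => simpa using (List.cons_sublist_cons (a := k)).mpr (ih (S.erase c))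
    | none => exact (ih S).cons k

lemma pvGMatch_residual_sublist (cands : Int → List Int) :
    ∀ (K S : List Int), ((pvGMatch cands K S).2).Sublist S := by
  intro K
  induction K with
  | nil => intro S; simp [pvGMatch]
  | cons k K ih =>
    intro S
    simp only [pvGMatch]
    cases hf : (cands k).find? (fun c => decide (c ∈ S)) with
    | some c => exact (ih (S.erase c)).trans (List.erase_sublist)
    | none => exact ih S

lemma pvGMatch1_matched : ∀ (K S : List Int), K.Nodup →
    (pvGMatch pvCands1 K S).1 = K.filter (fun k => decide (k ∈ S)) := by
  intro K
  induction K with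
  | nil => intro S _; simp [pvGMatch]
  | cons k K ih =>
    intro S hK
    have hkK : k ∉ K := (List.nodup_cons.mp hK).1
    have hK' : K.Nodup := (List.nodup_cons.mp hK).2
    simp only [pvGMatch, pvCands1, List.find?_cons, List.find?_nil]
    by_cases hk : k ∈ S
    · rw [show (decide (k ∈ S)) = true by simp [hk]]
      simp only [List.filter_cons]
      rw [show (decide (k ∈ S)) = true by simp [hk], if_pos rfl]
      have hcg : K.filter (fun x => decide (x ∈ S.erase k)) = K.filter (fun x => decide (x ∈ S)) := by
        apply List.filter_congr
        intro x hx
        have hne : x ≠ k := fun he => hkK (he ▸ hx)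
        simp [List.mem_erase_of_ne hne]
      rw [ih (S.erase k) hK', hcg]
    · rw [show (decide (k ∈ S)) = false by simp [hk]]
      simp only [List.filter_cons]
      rw [show (decide (k ∈ S)) = false by simp [hk]]
      simp only [if_neg (by simp : ¬ (false = true))]
      exact ih S hK'

lemma pvGMatch1_residual : ∀ (K S : List Int), S.Nodup →
    ∀ x, (x ∈ (pvGMatch pvCands1 K S).2 ↔ x ∈ S ∧ x ∉ K) := by
  intro K
  induction K with
  | nil => intro S _ x; simp [pvGMatch]
  | cons k K ih =>
    intro S hS x
    simp only [pvGMatch, pvCands1, List.find?_cons, List.find?_nil]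
    by_cases hk : k ∈ S
    · rw [show (decide (k ∈ S)) = true by simp [hk]]
      simp only []
      rw [ih (S.erase k) (hS.erase k) x]
      by_cases hxk : x = k
      · subst hxk
        simp [List.Nodup.not_mem_erase hS]
      · simp [List.mem_erase_of_ne hxk, List.mem_cons, hxk]
    · rw [show (decide (k ∈ S)) = false by simp [hk]]
      simp only []
      rw [ih S hS x]
      constructor
      · rintro ⟨hxS, hxK⟩
        refine ⟨hxS, ?_⟩
        intro hm
        rcases List.mem_cons.mp hm with he | hm'
        · exact hk (he ▸ hxS)
        · exact hxK hm'
      · rintro ⟨hxS, hxK⟩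
        exact ⟨hxS, fun hm => hxK (List.mem_cons_of_mem _ hm)⟩

lemma pvGMatch_nilS (cands : Int → List Int) : ∀ K, pvGMatch cands K [] = ([], []) := by
  intro K
  induction K with
  | nil => simp [pvGMatch]
  | cons k K ih =>
    have hf : List.find? (fun c => false) (cands k) = none :=
      List.find?_eq_none.mpr (by simp)
    simp only [pvGMatch]
    simp only [List.mem_nil_iff, decide_false]
    rw [hf]
    exact ih

lemma pvGMatch2_drop (s : Int) : ∀ (K S : List Int), (∀ k ∈ K, s + 1 < k) →
    pvGMatch pvCands2 K (s :: S) =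
      ((pvGMatch pvCands2 K S).1, s :: (pvGMatch pvCands2 K S).2) := by
  intro K
  induction K with
  | nil => intro S _; simp [pvGMatch]
  | cons k K ih =>
    intro S h
    have hk : s + 1 < k := h k List.mem_cons_self
    have hne1 : k - 1 ≠ s := by omega
    have hne2 : k + 1 ≠ s := by omega
    have h1 : (k - 1 ∈ s :: S) ↔ (k - 1 ∈ S) := by
      simp only [List.mem_cons]
      exact or_iff_right hne1
    have h2 : (k + 1 ∈ s :: S) ↔ (k + 1 ∈ S) := by
      simp only [List.mem_cons]
      exact or_iff_right hne2
    have htail : ∀ k' ∈ K, s + 1 < k' := fun k' hm => h k' (List.mem_cons_of_mem _ hm)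
    simp only [pvGMatch, pvCands2]
    by_cases hm1 : k - 1 ∈ S
    · have hfL : List.find? (fun c => decide (c ∈ s :: S)) [k - 1, k + 1] = some (k - 1) := by
        simp [List.find?_cons, hne1, hm1]
      have hfS : List.find? (fun c => decide (c ∈ S)) [k - 1, k + 1] = some (k - 1) := by
        simp [List.find?_cons, hm1]
      rw [hfL, hfS]
      have herase : (s :: S).erase (k - 1) = s :: S.erase (k - 1) :=
        List.erase_cons_tail (by simpa using fun he => hne1 he.symm)
      simp only [herase, ih (S.erase (k - 1)) htail]
    · by_cases hm2 : k + 1 ∈ S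
      · have hfL : List.find? (fun c => decide (c ∈ s :: S)) [k - 1, k + 1] = some (k + 1) := by
          simp [List.find?_cons, hne1, hm1, hne2, hm2]
        have hfS : List.find? (fun c => decide (c ∈ S)) [k - 1, k + 1] = some (k + 1) := by
          simp [List.find?_cons, hm1, hm2]
        rw [hfL, hfS]
        have herase : (s :: S).erase (k + 1) = s :: S.erase (k + 1) :=
          List.erase_cons_tail (by simpa using fun he => hne2 he.symm)
        simp only [herase, ih (S.erase (k + 1)) htail]
      · have hfL : List.find? (fun c => decide (c ∈ s :: S)) [k - 1, k + 1] = none := by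
          simp [List.find?_cons, hne1, hm1, hne2, hm2]
        have hfS : List.find? (fun c => decide (c ∈ S)) [k - 1, k + 1] = none := by
          simp [List.find?_cons, hm1, hm2]
        rw [hfL, hfS]
        exact ih S htail

lemma pvGMatch2_eq_matchLoop : ∀ (K S : List Int),
    K.Pairwise (· < ·) → S.Pairwise (· < ·) → (∀ x ∈ K, x ∉ S) →
    (((pvGMatch pvCands2 K S).1.length : Int) = pvMatchLoop K S) := by
  have main : ∀ (N : Nat) (K S : List Int), K.length + S.length ≤ N →
      K.Pairwise (· < ·) → S.Pairwise (· < ·) → (∀ x ∈ K, x ∉ S) →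
      (((pvGMatch pvCands2 K S).1.length : Int) = pvMatchLoop K S) := by
    intro N
    induction N with
    | zero =>
      intro K S hlen _ _ _
      have hK : K = [] := List.eq_nil_of_length_eq_zero (by omega)
      have hS : S = [] := List.eq_nil_of_length_eq_zero (by omega)
      subst hK; subst hS
      simp [pvGMatch, pvMatchLoop]
    | succ N ihN =>
      intro K S hlen hK hS hdis
      match K, S with
      | [], S => simp [pvGMatch, pvMatchLoop]
      | k :: K, [] =>
        rw [pvGMatch_nilS]
        simp [pvMatchLoop]
      | k :: K, s :: S =>
        have hkK : ∀ x ∈ K, k < x := fun x hx => List.rel_of_pairwise_cons hK hx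
        have hsS : ∀ x ∈ S, s < x := fun x hx => List.rel_of_pairwise_cons hS hx
        have hK' : K.Pairwise (· < ·) := hK.of_cons
        have hS' : S.Pairwise (· < ·) := hS.of_cons
        have hks : k ≠ s := fun he => hdis k List.mem_cons_self (he ▸ List.mem_cons_self)
        rcases lt_trichotomy s (k - 1) with hlt | heq | hgt
        · -- s < k - 1 : s is matchable by nobody, drop it
          have hdrop : ∀ k' ∈ k :: K, s + 1 < k' := by
            intro k' hm
            rcases List.mem_cons.mp hm with he | hm'
            · omega
            · have := hkK k' hm'; omega
          rw [pvGMatch2_drop s (k :: K) S hdrop]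
          have hdis' : ∀ x ∈ k :: K, x ∉ S := by
            intro x hx hmem
            exact hdis x hx (List.mem_cons_of_mem _ hmem)
          have := ihN (k :: K) S (by simp at hlen ⊢; omega) hK hS' hdis'
          rw [show ((((pvGMatch pvCands2 (k :: K) S).1, s :: (pvGMatch pvCands2 (k :: K) S).2)).1.length : Int) = ((pvGMatch pvCands2 (k :: K) S).1.length : Int) from rfl, this]
          have hc1 : ¬ (k - s = 1) := by omega
          have hc2 : ¬ (s - k = 1) := by omega
          have hc3 : ¬ (k < s) := by omega
          simp [pvMatchLoop, hc1, hc2, hc3]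
        · -- s = k - 1 : match (left preference)
          have hf : List.find? (fun c => decide (c ∈ s :: S)) [k - 1, k + 1] = some (k - 1) := by
            have : k - 1 = s := by omega
            simp [List.find?_cons, this]
          have herase : (s :: S).erase (k - 1) = S := by
            rw [show k - 1 = s by omega]
            exact List.erase_cons_head s S
          have hstep : pvGMatch pvCands2 (k :: K) (s :: S) =
              (k :: (pvGMatch pvCands2 K S).1, (pvGMatch pvCands2 K S).2) := by
            simp only [pvGMatch, pvCands2, hf, herase]
          rw [hstep]
          have hdis' : ∀ x ∈ K, x ∉ S := fun x hx hm =>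
            hdis x (List.mem_cons_of_mem _ hx) (List.mem_cons_of_mem _ hm)
          have := ihN K S (by simp at hlen ⊢; omega) hK' hS' hdis'
          have hc1 : k - s = 1 := by omega
          have hpl : pvMatchLoop (k :: K) (s :: S) = pvMatchLoop K S + 1 := by
            simp [pvMatchLoop, hc1]
          rw [hpl, ← this]
          simp only [List.length_cons]
          push_cast
          ring
        · -- s > k - 1, s ≠ k: either s = k + 1 (match) or s > k + 1 (drop k)
          rcases lt_trichotomy s (k + 1) with h2 | h2 | h2
          · omega
          · -- s = k + 1 : match on the right
            have hm1 : k - 1 ∉ s :: S := by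
              intro hm
              rcases List.mem_cons.mp hm with he | hm'
              · omega
              · have := hsS _ hm'; omega
            have hma : ¬ (k - 1 = s) := by omega
            have hmb : k - 1 ∉ S := fun hm' => hm1 (List.mem_cons_of_mem _ hm')
            have hmc : k + 1 = s := by omega
            have hf : List.find? (fun c => decide (c ∈ s :: S)) [k - 1, k + 1] = some (k + 1) := by
              simp [List.find?_cons, hma, hmb, hmc]
            have herase : (s :: S).erase (k + 1) = S := by
              rw [show k + 1 = s by omega]
              exact List.erase_cons_head s S
            have hstep : pvGMatch pvCands2 (k :: K) (s :: S) =
                (k :: (pvGMatch pvCands2 K S).1, (pvGMatch pvCands2 K S).2) := by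
              simp only [pvGMatch, pvCands2, hf, herase]
            rw [hstep]
            have hdis' : ∀ x ∈ K, x ∉ S := fun x hx hm =>
              hdis x (List.mem_cons_of_mem _ hx) (List.mem_cons_of_mem _ hm)
            have := ihN K S (by simp at hlen ⊢; omega) hK' hS' hdis'
            have hc2 : s - k = 1 := by omega
            have hpl : pvMatchLoop (k :: K) (s :: S) = pvMatchLoop K S + 1 := by
              simp [pvMatchLoop, hc2]
            rw [hpl, ← this]
            simp only [List.length_cons]
            push_cast
            ring
          · -- k + 1 < s : k is matchable by nobody, drop it
            have hma : ¬ (k - 1 = s) := by omega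
            have hmb : k - 1 ∉ S := by
              intro hm'
              have := hsS _ hm'; omega
            have hmc : ¬ (k + 1 = s) := by omega
            have hmd : k + 1 ∉ S := by
              intro hm'
              have := hsS _ hm'; omega
            have hf : List.find? (fun c => decide (c ∈ s :: S)) [k - 1, k + 1] = none := by
              simp [List.find?_cons, hma, hmb, hmc, hmd]
            have hstep : pvGMatch pvCands2 (k :: K) (s :: S) = pvGMatch pvCands2 K (s :: S) := by
              simp only [pvGMatch, pvCands2, hf]
            rw [hstep]
            have hdis' : ∀ x ∈ K, x ∉ s :: S := fun x hx hm =>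
              hdis x (List.mem_cons_of_mem _ hx) hm
            have := ihN K (s :: S) (by simp at hlen ⊢; omega) hK' hS hdis'
            have hc1 : ¬ (k - s = 1) := by omega
            have hc2 : ¬ (s - k = 1) := by omega
            have hc3 : k < s := by omega
            simp [pvMatchLoop, hc1, hc2, hc3, this]
  intro K S hK hS hdis
  exact main (K.length + S.length) K S le_rfl hK hS hdis

lemma pvFoldlInsertOne_get? : ∀ (l : List Int) (d : PySem.Dict Int Int) (x : Int),
    (l.foldl (fun d k => d.insert k (1 : Int)) d).get? x =
      if x ∈ l then some 1 else d.get? x := by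
  intro l
  induction l with
  | nil => intro d x; simp
  | cons a l ih =>
    intro d x
    simp only [List.foldl_cons, ih, PySem.Dict.get?_insert]
    by_cases hx : x ∈ l <;> by_cases hxa : x = a <;> simp [hx, hxa]

lemma pvFoldlInsertOne_keys : ∀ (l : List Int) (d : PySem.Dict Int Int),
    (l.foldl (fun d k => d.insert k (1 : Int)) d).keys = PySem.Set.update d.keys l := by
  intro l
  induction l with
  | nil => intro d; rfl
  | cons a l ih =>
    intro d
    have hupd : PySem.Set.update d.keys (a :: l) = PySem.Set.update (PySem.Set.add d.keys a) l := rfl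
    rw [List.foldl_cons, ih (d.insert a 1), hupd]
    congr 1
    by_cases hc : d.contains a = true
    · rw [PySem.Dict.keys_insert_of_contains (h := hc)]
      have hm : a ∈ d.keys := (PySem.Dict.contains_iff_mem_keys d a).mp hc
      simp [PySem.Set.add, hm]
    · rw [PySem.Dict.keys_insert_of_not_contains d 1 (by simpa using hc)]
      have hm : a ∉ d.keys := fun h => hc ((PySem.Dict.contains_iff_mem_keys d a).mpr h)
      simp [PySem.Set.add, hm]

lemma pvFilter_mem_of_sublist : ∀ (M K : List Int), M.Sublist K → K.Nodup →
    K.filter (fun x => decide (x ∈ M)) = M := by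
  intro M K h
  induction h with
  | slnil => intro _; rfl
  | @cons M K a h ih =>
    intro hK
    have ha : a ∉ K := (List.nodup_cons.mp hK).1
    have haM : a ∉ M := fun hm => ha (h.subset hm)
    simpa [haM] using ih (List.nodup_cons.mp hK).2
  | @cons₂ M K a h ih =>
    intro hK
    have ha : a ∉ K := (List.nodup_cons.mp hK).1
    have hcg : List.filter (fun x => decide (x ∈ a :: M)) K = List.filter (fun x => decide (x ∈ M)) K := by
      apply List.filter_congr
      intro x hx
      have hne : x ≠ a := fun he => ha (he ▸ hx)
      simp [List.mem_cons, hne]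
    have hfin : List.filter (fun x => decide (x ∈ a :: M)) K = M :=
      hcg.trans (ih (List.nodup_cons.mp hK).2)
    rw [List.filter_cons]
    have hpa : (decide (a ∈ a :: M)) = true := by simp
    rw [hpa, if_pos rfl, hfin]

lemma pvLength_filter_not_mem (M K : List Int) (h : M.Sublist K) (hK : K.Nodup) :
    (K.filter (fun x => decide (x ∉ M))).length = K.length - M.length := by
  have h1 : K.filter (fun x => decide (x ∈ M)) = M := pvFilter_mem_of_sublist M K h hK
  have h2 := List.length_eq_length_filter_add (l := K) (f := fun x => decide (x ∈ M))
  have h3 : K.filter (fun x => !(decide (x ∈ M))) = K.filter (fun x => decide (x ∉ M)) := by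
    simp
  rw [h1, h3] at h2
  omega

lemma pvOfList_sublist (xs : List Int) : (PySem.Set.ofList xs).Sublist xs := by
  have aux : ∀ (ys : List Int) (s : List Int), ∃ t, t.Sublist ys ∧ ys.foldl PySem.Set.add s = s ++ t := by
    intro ys
    induction ys with
    | nil => intro s; exact ⟨[], List.Sublist.refl _, by simp⟩
    | cons y ys ih =>
      intro s
      obtain ⟨t, hsub, heq⟩ := ih (PySem.Set.add s y)
      by_cases hy : y ∈ s
      · refine ⟨t, hsub.cons y, ?_⟩
        have hadd : PySem.Set.add s y = s := by simp [PySem.Set.add, hy]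
        simp only [List.foldl_cons, hadd] at heq ⊢
        exact heq
      · refine ⟨y :: t, (List.cons_sublist_cons (a := y)).mpr hsub, ?_⟩
        have hadd : PySem.Set.add s y = s ++ [y] := by simp [PySem.Set.add, hy]
        simp only [List.foldl_cons, hadd] at heq ⊢
        simpa using heq
  obtain ⟨t, hsub, heq⟩ := aux xs []
  have hof : PySem.Set.ofList xs = t := by rw [PySem.Set.ofList_eq_foldl, heq]; simp
  rw [hof]; exact hsub

lemma pvPairwise_lt_of_le_nodup (l : List Int)
    (h1 : l.Pairwise (· ≤ ·)) (h2 : l.Nodup) : l.Pairwise (· < ·) := by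
  have := h1.and h2
  exact this.imp fun h => lt_of_le_of_ne h.1 h.2

-- ===== VERDICT (by name: the statement is the Claim_ definition above) =====
theorem solution_spec : Claim_equal_solution := by
  intro n lost reserve _
  show solution n lost reserve = solution_alt n lost reserve
  unfold solution solution_alt
  have hstep1 :
      (fun (st : PySem.Dict Int Int × PySem.Dict Int Int) key =>
        if st.1.getD key 0 == 0 then st
        else if st.2.contains key && !(st.2.getD key 0 == 0) then
          (st.1.insert key 0, st.2.insert key 0)
        else st) = pvStep pvCands1 := pvStep1_eq
  have hstep2 :
      (fun (st : PySem.Dict Int Int × PySem.Dict Int Int) key =>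
        if st.1.getD key 0 == 0 then st
        else if st.2.contains (key - 1) && !(st.2.getD (key - 1) 0 == 0) then
          (st.1.insert key 0, st.2.insert (key - 1) 0)
        else if st.2.contains (key + 1) && !(st.2.getD (key + 1) 0 == 0) then
          (st.1.insert key 0, st.2.insert (key + 1) 0)
        else st) = pvStep pvCands2 := pvStep2_eq
  simp only [hstep1, hstep2]
  -- abbreviations
  set SL := PySem.List.sorted lost (fun x => x) false with hSL
  set SR := PySem.List.sorted reserve (fun x => x) false with hSR
  set lm0 := List.foldl (fun d k => d.insert k (1 : Int)) PySem.Dict.empty SL with hlm0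
  set rm0 := List.foldl (fun d k => d.insert k (1 : Int)) PySem.Dict.empty SR with hrm0
  set K := PySem.Set.ofList SL with hK
  set R0 := PySem.Set.ofList SR with hR0
  -- initial dict facts
  have hkeysL : lm0.keys = K := by
    rw [hlm0, pvFoldlInsertOne_keys, PySem.Dict.keys_empty, hK, PySem.Set.ofList_eq_foldl]
    rfl
  have hgetL : ∀ x, lm0.getD x 0 = if x ∈ SL then 1 else 0 := by
    intro x
    rw [hlm0, PySem.Dict.getD_eq_get?_getD, pvFoldlInsertOne_get?, PySem.Dict.get?_empty]
    by_cases hx : x ∈ SL <;> simp [hx]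
  have hgetR : ∀ x, rm0.getD x 0 = if x ∈ SR then 1 else 0 := by
    intro x
    rw [hrm0, PySem.Dict.getD_eq_get?_getD, pvFoldlInsertOne_get?, PySem.Dict.get?_empty]
    by_cases hx : x ∈ SR <;> simp [hx]
  have hKnd : K.Nodup := PySem.Set.nodup_ofList SL
  have hR0nd : R0.Nodup := PySem.Set.nodup_ofList SR
  have hKlt : K.Pairwise (· < ·) :=
    pvPairwise_lt_of_le_nodup K (List.Pairwise.sublist (pvOfList_sublist SL) (PySem.List.sorted_pairwise lost (fun x => x))) hKnd
  have hR0lt : R0.Pairwise (· < ·) :=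
    pvPairwise_lt_of_le_nodup R0 (List.Pairwise.sublist (pvOfList_sublist SR) (PySem.List.sorted_pairwise reserve (fun x => x))) hR0nd
  have hKmemSL : ∀ x, x ∈ K ↔ x ∈ SL := fun x => PySem.Set.mem_ofList SL x
  have hR0memSR : ∀ x, x ∈ R0 ↔ x ∈ SR := fun x => PySem.Set.mem_ofList SR x
  -- pass 1
  have hcont1 : ∀ k ∈ K, lm0.contains k = true := by
    intro k hm
    exact (PySem.Dict.contains_iff_mem_keys lm0 k).mpr (hkeysL ▸ hm)
  have hrmavail : ∀ x, (¬ rm0.getD x 0 = 0) ↔ x ∈ R0 := by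
    intro x
    rw [hgetR x, hR0memSR x]
    by_cases hx : x ∈ SR <;> simp [hx]
  have hpass1 := pvPass_shape pvCands1 K lm0 rm0 R0 hKnd hcont1 hR0nd hrmavail
  have hfil1 : K.filter (fun k => !(lm0.getD k 0 == 0)) = K := by
    apply List.filter_eq_self.mpr
    intro k hm
    rw [hgetL k, if_pos ((hKmemSL k).mp hm)]
    simp
  rw [hfil1] at hpass1
  obtain ⟨h1keys, h1get, h1avail⟩ := hpass1
  rw [hkeysL] at h1keys
  set st1 := List.foldl (pvStep pvCands1) (lm0, rm0) K with hst1
  set M1 := (pvGMatch pvCands1 K R0).1 with hM1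
  set S1 := (pvGMatch pvCands1 K R0).2 with hS1def
  have hM1eq : M1 = K.filter (fun k => decide (k ∈ R0)) := pvGMatch1_matched K R0 hKnd
  have hS1mem : ∀ x, x ∈ S1 ↔ x ∈ R0 ∧ x ∉ K := pvGMatch1_residual K R0 hR0nd
  have hS1sub : S1.Sublist R0 := pvGMatch_residual_sublist pvCands1 K R0
  have hS1nd : S1.Nodup := hR0nd.sublist hS1sub
  have hS1lt : S1.Pairwise (· < ·) := hR0lt.sublist hS1sub
  -- pass 2
  have hcont2 : ∀ k ∈ K, st1.1.contains k = true := by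
    intro k hm
    exact (PySem.Dict.contains_iff_mem_keys st1.1 k).mpr (h1keys ▸ hm)
  have hpass2 := pvPass_shape pvCands2 K st1.1 st1.2 S1 hKnd hcont2 hS1nd h1avail
  set K2 := K.filter (fun k => decide (k ∉ R0)) with hK2
  have hfil2 : K.filter (fun k => !(st1.1.getD k 0 == 0)) = K2 := by
    rw [hK2]
    apply List.filter_congr
    intro k hm
    rw [h1get k]
    by_cases hkM : k ∈ M1
    · have : k ∈ R0 := by
        rw [hM1eq] at hkM
        simpa using (List.mem_filter.mp hkM).2
      simp [hkM, this]
    · have hkR : k ∉ R0 := by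
        intro hr
        apply hkM
        rw [hM1eq]
        exact List.mem_filter.mpr ⟨hm, by simpa using hr⟩
      rw [if_neg hkM, hgetL k, if_pos ((hKmemSL k).mp hm)]
      simp [hkR]
  rw [hfil2] at hpass2
  obtain ⟨h2keys, h2get, _⟩ := hpass2
  rw [h1keys] at h2keys
  set st2 := List.foldl (pvStep pvCands2) st1 K with hst2
  set M2 := (pvGMatch pvCands2 K2 S1).1 with hM2
  have hM2sub : M2.Sublist K2 := pvGMatch_matched_sublist pvCands2 K2 S1
  have hK2sub : K2.Sublist K := List.filter_sublist (l := K)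
  have hK2nd : K2.Nodup := hKnd.sublist hK2sub
  have hK2lt : K2.Pairwise (· < ·) := hKlt.filter _
  -- the prefix (st1, K) of st2's fold is definitionally the fold over st1.1.keys
  have hfoldeq : List.foldl (pvStep pvCands2) st1 st1.1.keys = st2 := by
    rw [h1keys]
  -- final count
  have hvals : st2.1.values = K.map (fun k => st2.1.getD k 0) := by
    have : st2.1.keys.Nodup := by rw [h2keys]; exact hKnd
    have h := PySem.Dict.values_eq_map_keys st2.1 this 0
    rw [h2keys] at h
    exact h
  have hcount1 : List.foldl (fun acc v => if (v == 1) = true then acc + 1 else acc) (0 : Int) st2.1.values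
      = ((st2.1.values.countP (fun v => v == 1) : Int)) := by
    have := PySem.List.foldl_count_if (fun v => v == 1) st2.1.values 0
    simpa using this
  have hcntP : st2.1.values.countP (fun v => v == 1) = (K2.filter (fun x => decide (x ∉ M2))).length := by
    rw [hvals, List.countP_map]
    have hcg : K.countP ((fun v => v == 1) ∘ (fun k => st2.1.getD k 0)) =
        K.countP (fun k => decide (k ∉ M2) && decide (k ∉ R0)) := by
      apply List.countP_congr
      intro k hm
      simp only [Function.comp]
      rw [h2get k]
      by_cases hkM2 : k ∈ M2
      · have hkK2 : k ∈ K2 := hM2sub.subset hkM2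
        have hkR : k ∉ R0 := by
          rw [hK2] at hkK2
          simpa using (List.mem_filter.mp hkK2).2
        simp [hkM2]
      · rw [if_neg hkM2, h1get k]
        by_cases hkM1 : k ∈ M1
        · have hkR : k ∈ R0 := by
            rw [hM1eq] at hkM1
            simpa using (List.mem_filter.mp hkM1).2
          simp [hkM1, hkM2, hkR]
        · have hkR : k ∉ R0 := by
            intro hr
            apply hkM1
            rw [hM1eq]
            exact List.mem_filter.mpr ⟨hm, by simpa using hr⟩
          rw [if_neg hkM1, hgetL k, if_pos ((hKmemSL k).mp hm)]
          simp [hkR, hkM2]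
    rw [hcg, List.countP_eq_length_filter, ← List.filter_filter, ← hK2]
  have hlen : (K2.filter (fun x => decide (x ∉ M2))).length = K2.length - M2.length :=
    pvLength_filter_not_mem M2 K2 hM2sub hK2nd
  have hM2le : M2.length ≤ K2.length := hM2sub.length_le
  -- the greedy equals the two-pointer merge
  have hdis : ∀ x ∈ K2, x ∉ S1 := by
    intro x hx hs
    have hxK : x ∈ K := hK2sub.subset hx
    exact ((hS1mem x).mp hs).2 hxK
  have hmatch : ((M2.length : Int)) = pvMatchLoop K2 S1 := pvGMatch2_eq_matchLoop K2 S1 hK2lt hS1lt hdis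
  -- B's lists are exactly K2 and S1
  have hLeq : PySem.List.sorted ((PySem.Set.ofList lost).diff (PySem.Set.ofList reserve)) (fun x => x) false = K2 := by
    apply PySem.List.sorted_eq_of_perm_of_pairwise_lt
    · apply (List.perm_ext_iff_of_nodup hK2nd (PySem.Set.nodup_diff _ _ (PySem.Set.nodup_ofList lost))).mpr
      intro a
      rw [PySem.Set.mem_diff]
      constructor
      · intro ha
        have haK : a ∈ K := hK2sub.subset ha
        have haR : a ∉ R0 := by
          rw [hK2] at ha
          simpa using (List.mem_filter.mp ha).2
        refine ⟨?_, ?_⟩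
        · have := (hKmemSL a).mp haK
          rw [PySem.Set.mem_ofList]
          rw [hSL, PySem.List.mem_sorted] at this
          exact this
        · intro hmem
          apply haR
          rw [PySem.Set.mem_ofList] at hmem
          rw [hR0memSR a, hSR, PySem.List.mem_sorted]
          exact hmem
      · rintro ⟨hl, hr⟩
        rw [PySem.Set.mem_ofList] at hl
        rw [hK2]
        refine List.mem_filter.mpr ⟨?_, ?_⟩
        · rw [hKmemSL a, hSL, PySem.List.mem_sorted]
          exact hl
        · simp only [decide_eq_true_eq]
          intro hR
          apply hr
          rw [hR0memSR a, hSR, PySem.List.mem_sorted] at hR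
          rw [PySem.Set.mem_ofList]
          exact hR
    · exact hK2lt
  have hReq : PySem.List.sorted ((PySem.Set.ofList reserve).diff (PySem.Set.ofList lost)) (fun x => x) false = S1 := by
    apply PySem.List.sorted_eq_of_perm_of_pairwise_lt
    · apply (List.perm_ext_iff_of_nodup hS1nd (PySem.Set.nodup_diff _ _ (PySem.Set.nodup_ofList reserve))).mpr
      intro a
      rw [PySem.Set.mem_diff, hS1mem a]
      constructor
      · rintro ⟨hr, hk⟩
        refine ⟨?_, ?_⟩
        · rw [hR0memSR a, hSR, PySem.List.mem_sorted] at hr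
          rw [PySem.Set.mem_ofList]
          exact hr
        · intro hl
          apply hk
          rw [PySem.Set.mem_ofList] at hl
          rw [hKmemSL a, hSL, PySem.List.mem_sorted]
          exact hl
      · rintro ⟨hr, hl⟩
        rw [PySem.Set.mem_ofList] at hr
        refine ⟨?_, ?_⟩
        · rw [hR0memSR a, hSR, PySem.List.mem_sorted]
          exact hr
        · intro hk
          apply hl
          rw [hKmemSL a, hSL, PySem.List.mem_sorted] at hk
          rw [PySem.Set.mem_ofList]
          exact hk
    · exact hS1lt
  -- wrap up
  rw [hkeysL, hfoldeq, hcount1, hcntP, hlen, hLeq, hReq, ← hmatch]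
  have hK2len : (PySem.List.sorted ((PySem.Set.ofList lost).diff (PySem.Set.ofList reserve)) (fun x => x) false).length = K2.length := by
    rw [hLeq]
  push_cast [Nat.cast_sub hM2le]
  ring
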